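-- pv_equiv track=rewrite | github.com/AlenaKh152/AQA_HW | HW_8_bulls.py | is_num_valid
-- ===== SOURCE A (Python) =====
-- def is_num_valid(num):                                       # проверка на повторяющиеся цифры и длину введенного числа
--     is_valid = ''
--     if len(num) != 4:
--         is_valid = 'length'
--     else:
--         for i in num:
--             if num.count(i) == 1:
--                 is_valid = 'true'
--             elif num.count(i) > 1:
--                 is_valid = 'false'
--                 break
--     return is_valid
-- ===== SOURCE B (Python) =====
-- def is_num_valid(num):
--     if len(num) != 4:
--         return 'length'
--     return 'true' if len(set(num)) == 4 else 'false'
-- ===== Notes on version B (the rewrite author's own statement) =====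
-- stated objective: simpler
-- what changed: Replaces the per-character counting loop with early break by a single set dedup: build set(num) once and compare its size to 4.
import Mathlib
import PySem

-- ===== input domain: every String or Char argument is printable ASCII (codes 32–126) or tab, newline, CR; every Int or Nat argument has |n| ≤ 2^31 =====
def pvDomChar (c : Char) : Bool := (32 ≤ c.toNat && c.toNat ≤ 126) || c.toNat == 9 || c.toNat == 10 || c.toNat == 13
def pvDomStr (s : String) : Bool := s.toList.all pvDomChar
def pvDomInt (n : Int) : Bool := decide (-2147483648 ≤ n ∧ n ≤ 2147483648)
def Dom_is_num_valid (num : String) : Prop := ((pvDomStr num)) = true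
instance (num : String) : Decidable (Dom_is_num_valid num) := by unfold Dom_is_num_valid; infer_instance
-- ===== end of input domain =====

-- B replaces A's per-character counting loop (with early break) by one set dedup and a size comparison: simpler.

-- ===== PORT A =====
-- the for-loop over num with the running is_valid string and the break in the elif branch
-- (num.count(i) for a single character i equals List.count over the characters, exact here)
def pvLoopA (full : List Char) : List Char → String → String
  | [], v => v
  | c :: rest, v =>
    if full.count c = 1 then pvLoopA full rest "true"
    else if full.count c > 1 then "false"
    else pvLoopA full rest v

def is_num_valid (num : String) : String :=
  let l := num.toList
  if l.length ≠ 4 then "length"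
  else pvLoopA l l ""

-- ===== PORT B =====
def is_num_valid_alt (num : String) : String :=
  let l := num.toList
  if l.length ≠ 4 then "length"
  else if (PySem.Set.ofList l).length = 4 then "true" else "false"

-- ===== PRECONDITION & SPEC =====
def Spec_is_num_valid (num : String) (out : String) : Prop := out = is_num_valid_alt num
instance (num : String) (out : String) : Decidable (Spec_is_num_valid num out) := by unfold Spec_is_num_valid; infer_instance

-- ===== CLAIM (what is proved, stated in full; the proofs are below) =====
def Claim_equal_is_num_valid : Prop := ∀ (num : String), Dom_is_num_valid num → Spec_is_num_valid num (is_num_valid num)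

-- ===== LEMMAS AND PROOFS =====

-- A's loop returns "true" when every character of the (nonempty) remainder occurs exactly once in the full string
lemma pvLoopA_true (full : List Char) (rest : List Char) (v : String)
    (h1 : ∀ c ∈ rest, full.count c = 1) (hne : rest ≠ []) : pvLoopA full rest v = "true" := by
  induction rest generalizing v with
  | nil => exact absurd rfl hne
  | cons c rs ih =>
    simp only [pvLoopA, h1 c (List.mem_cons_self), if_true]
    cases rs with
    | nil => simp [pvLoopA]
    | cons d ds => exact ih "true" (fun x hx => h1 x (List.mem_cons_of_mem _ hx)) (by simp)

-- A's loop breaks with "false" as soon as it meets a repeated character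
lemma pvLoopA_false (full : List Char) (rest : List Char) (v : String)
    (hsub : ∀ c ∈ rest, c ∈ full) (hdup : ∃ c ∈ rest, full.count c > 1) :
    pvLoopA full rest v = "false" := by
  induction rest generalizing v with
  | nil => obtain ⟨c, hc, _⟩ := hdup; exact absurd hc (List.not_mem_nil)
  | cons c rs ih =>
    by_cases h1 : full.count c = 1
    · simp only [pvLoopA, if_pos h1]
      obtain ⟨x, hx, hxc⟩ := hdup
      rcases List.mem_cons.mp hx with rfl | hx'
      · omega
      · exact ih _ (fun y hy => hsub y (List.mem_cons_of_mem _ hy)) ⟨x, hx', hxc⟩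
    · have hc1 : full.count c ≥ 1 := List.count_pos_iff.mpr (hsub c List.mem_cons_self)
      have : full.count c > 1 := by omega
      simp [pvLoopA, h1, this]

-- |set(l)| equals the number of distinct elements of l
lemma ofList_length_eq_card (l : List Char) : (PySem.Set.ofList l).length = l.toFinset.card := by
  have hn : (PySem.Set.ofList l).Nodup := PySem.Set.nodup_ofList l
  have hm : ∀ x, x ∈ PySem.Set.ofList l ↔ x ∈ l := fun x => PySem.Set.mem_ofList l x
  have : (PySem.Set.ofList l).toFinset = l.toFinset := by
    ext x; simp [List.mem_toFinset, hm x]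
  calc (PySem.Set.ofList l).length = (PySem.Set.ofList l).toFinset.card :=
        (List.toFinset_card_of_nodup hn).symm
    _ = l.toFinset.card := by rw [this]

-- ===== VERDICT (by name: the statement is the Claim_ definition above) =====
theorem is_num_valid_spec : Claim_equal_is_num_valid := by
  intro num _
  unfold Spec_is_num_valid is_num_valid is_num_valid_alt
  set l := num.toList with hl
  by_cases hlen : l.length ≠ 4
  · simp [hlen]
  · push Not at hlen
    simp only [hlen, ne_eq, not_true_eq_false, if_false]
    by_cases hnd : l.Nodup
    · have htrue : pvLoopA l l "" = "true" :=
        pvLoopA_true l l "" (fun c hc => List.nodup_iff_count_eq_one.mp hnd c hc)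
          (by intro h; rw [h] at hlen; simp at hlen)
      have hcard : (PySem.Set.ofList l).length = 4 := by
        rw [ofList_length_eq_card, List.toFinset_card_of_nodup hnd, hlen]
      rw [htrue, if_pos hcard]
    · have hdup : ∃ c ∈ l, l.count c > 1 := by
        rw [List.nodup_iff_count_le_one] at hnd
        push Not at hnd
        obtain ⟨c, hc⟩ := hnd
        exact ⟨c, List.count_pos_iff.mp (by omega), hc⟩
      have hfalse : pvLoopA l l "" = "false" := pvLoopA_false l l "" (fun c hc => hc) hdup
      have hcard : (PySem.Set.ofList l).length ≠ 4 := by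
        rw [ofList_length_eq_card]
        have hle : l.toFinset.card ≤ l.length := List.toFinset_card_le l
        have hne : l.toFinset.card ≠ l.length := by
          intro h
          exact hnd (Multiset.toFinset_card_eq_card_iff_nodup.mp h)
        omega
      rw [hfalse, if_neg hcard]
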